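-- pv_equiv track=rewrite | github.com/LynnHo/AttGAN-Tensorflow | data.py | check_attribute_conflict
-- ===== SOURCE A (Python) =====
-- def check_attribute_conflict(att_batch, att_name, att_names):
--     def _set(att, value, att_name):
--         if att_name in att_names:
--             att[att_names.index(att_name)] = value
--
--     att_id = att_names.index(att_name)
--
--     for att in att_batch:
--         if att_name in ['Bald', 'Receding_Hairline'] and att[att_id] == 1:
--             _set(att, 0, 'Bangs')
--         elif att_name == 'Bangs' and att[att_id] == 1:
--             _set(att, 0, 'Bald')
--             _set(att, 0, 'Receding_Hairline')
--         elif att_name in ['Black_Hair', 'Blond_Hair', 'Brown_Hair', 'Gray_Hair'] and att[att_id] == 1: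
--             for n in ['Black_Hair', 'Blond_Hair', 'Brown_Hair', 'Gray_Hair']:
--                 if n != att_name:
--                     _set(att, 0, n)
--         elif att_name in ['Straight_Hair', 'Wavy_Hair'] and att[att_id] == 1:
--             for n in ['Straight_Hair', 'Wavy_Hair']:
--                 if n != att_name:
--                     _set(att, 0, n)
--         elif att_name in ['Mustache', 'No_Beard'] and att[att_id] == 1:
--             for n in ['Mustache', 'No_Beard']:
--                 if n != att_name:
--                     _set(att, 0, n)
--
--     return att_batch
-- ===== SOURCE B (Python) =====
-- _GROUPS = [
--     ['Bald', 'Bangs'],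
--     ['Receding_Hairline', 'Bangs'],
--     ['Black_Hair', 'Blond_Hair', 'Brown_Hair', 'Gray_Hair'],
--     ['Straight_Hair', 'Wavy_Hair'],
--     ['Mustache', 'No_Beard'],
-- ]
--
--
-- def check_attribute_conflict(att_batch, att_name, att_names):
--     att_id = att_names.index(att_name)
--     zero_idx = {att_names.index(n)
--                 for g in _GROUPS if att_name in g
--                 for n in g if n != att_name and n in att_names}
--     if not zero_idx:
--         return att_batch
--     return [[0 if j in zero_idx else v for j, v in enumerate(att)]
--             if att[att_id] == 1 else att
--             for att in att_batch]
-- ===== Notes on version B (the rewrite author's own statement) =====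
-- stated objective: alternative
-- what changed: Replaces the five-way if/elif ladder with per-target in-place writes by a declarative list of mutually-exclusive attribute groups from which the set of column indices to zero is computed once, and each affected row is rebuilt positionally in a single comprehension instead of being mutated per target.
import Mathlib
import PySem

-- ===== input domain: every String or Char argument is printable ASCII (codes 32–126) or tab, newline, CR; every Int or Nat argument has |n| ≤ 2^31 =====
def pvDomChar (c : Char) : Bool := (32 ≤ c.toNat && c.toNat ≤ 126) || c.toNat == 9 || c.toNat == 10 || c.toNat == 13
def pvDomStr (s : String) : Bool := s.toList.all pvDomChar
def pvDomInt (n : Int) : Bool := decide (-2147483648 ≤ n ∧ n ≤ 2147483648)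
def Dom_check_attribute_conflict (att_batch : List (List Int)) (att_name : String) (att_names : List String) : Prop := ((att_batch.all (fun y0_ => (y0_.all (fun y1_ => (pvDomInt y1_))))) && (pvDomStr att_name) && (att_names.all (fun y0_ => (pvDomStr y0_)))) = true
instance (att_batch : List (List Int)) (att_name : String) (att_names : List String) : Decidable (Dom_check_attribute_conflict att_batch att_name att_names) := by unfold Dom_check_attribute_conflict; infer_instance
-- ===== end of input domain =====

-- B replaces A's five-way if/elif ladder and per-target in-place writes by a list of
-- mutually-exclusive attribute groups, a target-index set computed ONCE, and a positional
-- rebuild of each affected row (objective: alternative/simpler). A mutates rows of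
-- att_batch in place and returns it; B builds fresh rows, so the equivalence proved here
-- is about the RETURN value only.


-- ===== PORT A =====
-- _set(att, 0, n): in-range assignment att[att_names.index(n)] = 0 (Pre_ keeps the index in range)
def pvSetA (att_names : List String) (att : List Int) (n : String) : List Int :=
  if n ∈ att_names then att.set (att_names.idxOf n) 0 else att

def pvRowA (att_name : String) (att_names : List String) (att_id : Nat) (att : List Int) : List Int :=
  if (att_name = "Bald" ∨ att_name = "Receding_Hairline") ∧ att.getD att_id 0 = 1 then
    pvSetA att_names att "Bangs"
  else if att_name = "Bangs" ∧ att.getD att_id 0 = 1 then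
    pvSetA att_names (pvSetA att_names att "Bald") "Receding_Hairline"
  else if att_name ∈ ["Black_Hair", "Blond_Hair", "Brown_Hair", "Gray_Hair"] ∧ att.getD att_id 0 = 1 then
    ["Black_Hair", "Blond_Hair", "Brown_Hair", "Gray_Hair"].foldl
      (fun a n => if n ≠ att_name then pvSetA att_names a n else a) att
  else if (att_name = "Straight_Hair" ∨ att_name = "Wavy_Hair") ∧ att.getD att_id 0 = 1 then
    ["Straight_Hair", "Wavy_Hair"].foldl
      (fun a n => if n ≠ att_name then pvSetA att_names a n else a) att
  else if (att_name = "Mustache" ∨ att_name = "No_Beard") ∧ att.getD att_id 0 = 1 then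
    ["Mustache", "No_Beard"].foldl
      (fun a n => if n ≠ att_name then pvSetA att_names a n else a) att
  else att

def check_attribute_conflict (att_batch : List (List Int)) (att_name : String) (att_names : List String) : List (List Int) :=
  let att_id := att_names.idxOf att_name
  att_batch.map (pvRowA att_name att_names att_id)

-- ===== PORT B =====
-- the mutually-exclusive groups (_GROUPS in Source B)
def pvGroups : List (List String) :=
  [["Bald", "Bangs"],
   ["Receding_Hairline", "Bangs"],
   ["Black_Hair", "Blond_Hair", "Brown_Hair", "Gray_Hair"],
   ["Straight_Hair", "Wavy_Hair"],
   ["Mustache", "No_Beard"]]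

-- the elements fed into the set comprehension, in generator order; indices returned by
-- list.index are nonnegative, so Nat is exact here
def pvTargetIdx (att_name : String) (att_names : List String) : List Nat :=
  ((pvGroups.filter (fun g => att_name ∈ g)).flatMap
      (fun g => g.filter (fun n => n ≠ att_name ∧ n ∈ att_names))).map att_names.idxOf

def check_attribute_conflict_alt (att_batch : List (List Int)) (att_name : String) (att_names : List String) : List (List Int) :=
  let _att_id := att_names.idxOf att_name
  let zero_idx : PySem.Set Nat := PySem.Set.ofList (pvTargetIdx att_name att_names)
  if zero_idx = [] then att_batch
  else
    att_batch.map (fun att =>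
      if att.getD (att_names.idxOf att_name) 0 = 1 then
        -- [0 if j in zero_idx else v for j, v in enumerate(att)]
        att.mapIdx (fun j v => if j ∈ zero_idx then 0 else v)
      else att)

-- ===== PRECONDITION & SPEC =====
-- The names whose column A READS or WRITES for a given att_name (before the presence
-- filter), used only to state Pre_.
def pvTargetsOf (s : String) : List String :=
  if s = "Bald" ∨ s = "Receding_Hairline" then ["Bangs"]
  else if s = "Bangs" then ["Bald", "Receding_Hairline"]
  else if s = "Black_Hair" ∨ s = "Blond_Hair" ∨ s = "Brown_Hair" ∨ s = "Gray_Hair" then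
    (["Black_Hair", "Blond_Hair", "Brown_Hair", "Gray_Hair"]).filter (· ≠ s)
  else if s = "Straight_Hair" ∨ s = "Wavy_Hair" then
    (["Straight_Hair", "Wavy_Hair"]).filter (· ≠ s)
  else if s = "Mustache" ∨ s = "No_Beard" then
    (["Mustache", "No_Beard"]).filter (· ≠ s)
  else []

-- Pre_ excludes exactly where Python A raises: att_names.index(att_name) raises ValueError
-- when att_name is absent, and the read att[att_id] / writes att[att_names.index(n)] raise
-- IndexError when a row is too short (the read happens iff att_name has conflict targets).
def Pre_check_attribute_conflict (att_batch : List (List Int)) (att_name : String) (att_names : List String) : Prop :=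
  att_name ∈ att_names ∧
  ∀ att ∈ att_batch, ∀ n ∈ pvTargetsOf att_name,
    att_names.idxOf att_name < att.length ∧
    (att.getD (att_names.idxOf att_name) 0 = 1 → n ∈ att_names → att_names.idxOf n < att.length)

instance (att_batch : List (List Int)) (att_name : String) (att_names : List String) : Decidable (Pre_check_attribute_conflict att_batch att_name att_names) := by unfold Pre_check_attribute_conflict; infer_instance

def pvWitness_check_attribute_conflict : List (List Int) × String × List String :=
  ([[1, 1], [0, 1]], "Bald", ["Bald", "Bangs"])

def Spec_check_attribute_conflict (att_batch : List (List Int)) (att_name : String) (att_names : List String) (out : List (List Int)) : Prop := out = check_attribute_conflict_alt att_batch att_name att_names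
instance (att_batch : List (List Int)) (att_name : String) (att_names : List String) (out : List (List Int)) : Decidable (Spec_check_attribute_conflict att_batch att_name att_names out) := by unfold Spec_check_attribute_conflict; infer_instance

-- ===== CLAIM =====
def Claim_equal_check_attribute_conflict : Prop := ∀ (att_batch : List (List Int)) (att_name : String) (att_names : List String), Dom_check_attribute_conflict att_batch att_name att_names → Pre_check_attribute_conflict att_batch att_name att_names → Spec_check_attribute_conflict att_batch att_name att_names (check_attribute_conflict att_batch att_name att_names)

-- ===== LEMMAS AND PROOFS =====
lemma pv_mapIdx_noop (att : List Int) : att.mapIdx (fun _ v => v) = att := by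
  apply List.ext_getElem <;> simp

lemma pv_foldl_pvSetA (att_names : List String) (ns : List String) (att : List Int) :
    ns.foldl (fun a n => pvSetA att_names a n) att
      = ((ns.filter (fun n => n ∈ att_names)).map att_names.idxOf).foldl
          (fun a i => a.set i 0) att := by
  induction ns generalizing att with
  | nil => rfl
  | cons n ns ih =>
    by_cases h : n ∈ att_names
    · rw [List.foldl_cons, show pvSetA att_names att n = att.set (att_names.idxOf n) 0 from by
          simp [pvSetA, h],
        List.filter_cons_of_pos (by simpa using h), List.map_cons, List.foldl_cons]
      exact ih _
    · rw [List.foldl_cons, show pvSetA att_names att n = att from by simp [pvSetA, h],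
        List.filter_cons_of_neg (by simpa using h)]
      exact ih _

lemma pv_foldl_set_eq_mapIdx (idxs : List Nat) (att : List Int) :
    idxs.foldl (fun a i => a.set i 0) att
      = att.mapIdx (fun j v => if j ∈ idxs then 0 else v) := by
  induction idxs generalizing att with
  | nil => simp [pv_mapIdx_noop]
  | cons i idxs ih =>
    simp only [List.foldl_cons, ih]
    apply List.ext_getElem
    · simp
    · intro j h1 h2
      simp only [List.getElem_mapIdx, List.getElem_set] at *
      by_cases hj : j ∈ idxs
      · simp [hj]
      · by_cases hij : i = j
        · simp [hj, hij]
        · simp [hj, hij, Ne.symm hij]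

lemma pv_mapIdx_mem_congr (l1 l2 : List Nat) (h : ∀ j, j ∈ l1 ↔ j ∈ l2) (att : List Int) :
    att.mapIdx (fun j v => if j ∈ l1 then 0 else v)
      = att.mapIdx (fun j v => if j ∈ l2 then 0 else v) := by
  apply List.ext_getElem <;> simp [h]

lemma pv_row_eq (att_name : String) (att_names : List String) (att : List Int) :
    pvRowA att_name att_names (att_names.idxOf att_name) att
      = if att.getD (att_names.idxOf att_name) 0 = 1 then
          att.mapIdx (fun j v => if j ∈ pvTargetIdx att_name att_names then 0 else v)
        else att := by
  have step : ∀ (ns : List String),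
      ns.foldl (fun a n => pvSetA att_names a n) att
        = att.mapIdx (fun j v =>
            if j ∈ ((ns.filter (fun n => n ∈ att_names)).map att_names.idxOf) then 0 else v) := by
    intro ns; rw [pv_foldl_pvSetA, pv_foldl_set_eq_mapIdx]
  by_cases h1 : att_name = "Bald"
  · subst h1
    simp only [List.getD_eq_getElem?_getD]
    by_cases hv : (att[List.idxOf "Bald" att_names]?).getD 0 = 1
    · have lhs : pvRowA "Bald" att_names (List.idxOf "Bald" att_names) att
          = (["Bangs"] : List String).foldl (fun a n => pvSetA att_names a n) att := by
        simp [pvRowA, hv]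
      rw [lhs, step, if_pos hv]
      exact pv_mapIdx_mem_congr _ _
        (by intro j; simp [pvTargetIdx, pvGroups, List.filter_cons]; try tauto) att
    · simp [pvRowA, hv]
  by_cases h2 : att_name = "Receding_Hairline"
  · subst h2
    simp only [List.getD_eq_getElem?_getD]
    by_cases hv : (att[List.idxOf "Receding_Hairline" att_names]?).getD 0 = 1
    · have lhs : pvRowA "Receding_Hairline" att_names (List.idxOf "Receding_Hairline" att_names) att
          = (["Bangs"] : List String).foldl (fun a n => pvSetA att_names a n) att := by
        simp [pvRowA, hv]
      rw [lhs, step, if_pos hv]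
      exact pv_mapIdx_mem_congr _ _
        (by intro j; simp [pvTargetIdx, pvGroups, List.filter_cons]; try tauto) att
    · simp [pvRowA, hv]
  by_cases h3 : att_name = "Bangs"
  · subst h3
    simp only [List.getD_eq_getElem?_getD]
    by_cases hv : (att[List.idxOf "Bangs" att_names]?).getD 0 = 1
    · have lhs : pvRowA "Bangs" att_names (List.idxOf "Bangs" att_names) att
          = (["Bald", "Receding_Hairline"] : List String).foldl (fun a n => pvSetA att_names a n) att := by
        simp [pvRowA, hv]
      rw [lhs, step, if_pos hv]
      exact pv_mapIdx_mem_congr _ _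
        (by intro j; simp [pvTargetIdx, pvGroups, List.filter_cons]
            split_ifs <;> simp_all) att
    · simp [pvRowA, hv]
  by_cases h4 : att_name = "Black_Hair"
  · subst h4
    simp only [List.getD_eq_getElem?_getD]
    by_cases hv : (att[List.idxOf "Black_Hair" att_names]?).getD 0 = 1
    · have lhs : pvRowA "Black_Hair" att_names (List.idxOf "Black_Hair" att_names) att
          = (["Blond_Hair", "Brown_Hair", "Gray_Hair"] : List String).foldl (fun a n => pvSetA att_names a n) att := by
        simp [pvRowA, hv]
      rw [lhs, step, if_pos hv]
      exact pv_mapIdx_mem_congr _ _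
        (by intro j; simp [pvTargetIdx, pvGroups, List.filter_cons]; try tauto) att
    · simp [pvRowA, hv]
  by_cases h5 : att_name = "Blond_Hair"
  · subst h5
    simp only [List.getD_eq_getElem?_getD]
    by_cases hv : (att[List.idxOf "Blond_Hair" att_names]?).getD 0 = 1
    · have lhs : pvRowA "Blond_Hair" att_names (List.idxOf "Blond_Hair" att_names) att
          = (["Black_Hair", "Brown_Hair", "Gray_Hair"] : List String).foldl (fun a n => pvSetA att_names a n) att := by
        simp [pvRowA, hv]
      rw [lhs, step, if_pos hv]
      exact pv_mapIdx_mem_congr _ _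
        (by intro j; simp [pvTargetIdx, pvGroups, List.filter_cons]; try tauto) att
    · simp [pvRowA, hv]
  by_cases h6 : att_name = "Brown_Hair"
  · subst h6
    simp only [List.getD_eq_getElem?_getD]
    by_cases hv : (att[List.idxOf "Brown_Hair" att_names]?).getD 0 = 1
    · have lhs : pvRowA "Brown_Hair" att_names (List.idxOf "Brown_Hair" att_names) att
          = (["Black_Hair", "Blond_Hair", "Gray_Hair"] : List String).foldl (fun a n => pvSetA att_names a n) att := by
        simp [pvRowA, hv]
      rw [lhs, step, if_pos hv]
      exact pv_mapIdx_mem_congr _ _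
        (by intro j; simp [pvTargetIdx, pvGroups, List.filter_cons]; try tauto) att
    · simp [pvRowA, hv]
  by_cases h7 : att_name = "Gray_Hair"
  · subst h7
    simp only [List.getD_eq_getElem?_getD]
    by_cases hv : (att[List.idxOf "Gray_Hair" att_names]?).getD 0 = 1
    · have lhs : pvRowA "Gray_Hair" att_names (List.idxOf "Gray_Hair" att_names) att
          = (["Black_Hair", "Blond_Hair", "Brown_Hair"] : List String).foldl (fun a n => pvSetA att_names a n) att := by
        simp [pvRowA, hv]
      rw [lhs, step, if_pos hv]
      exact pv_mapIdx_mem_congr _ _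
        (by intro j; simp [pvTargetIdx, pvGroups, List.filter_cons]; try tauto) att
    · simp [pvRowA, hv]
  by_cases h8 : att_name = "Straight_Hair"
  · subst h8
    simp only [List.getD_eq_getElem?_getD]
    by_cases hv : (att[List.idxOf "Straight_Hair" att_names]?).getD 0 = 1
    · have lhs : pvRowA "Straight_Hair" att_names (List.idxOf "Straight_Hair" att_names) att
          = (["Wavy_Hair"] : List String).foldl (fun a n => pvSetA att_names a n) att := by
        simp [pvRowA, hv]
      rw [lhs, step, if_pos hv]
      exact pv_mapIdx_mem_congr _ _
        (by intro j; simp [pvTargetIdx, pvGroups, List.filter_cons]; try tauto) att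
    · simp [pvRowA, hv]
  by_cases h9 : att_name = "Wavy_Hair"
  · subst h9
    simp only [List.getD_eq_getElem?_getD]
    by_cases hv : (att[List.idxOf "Wavy_Hair" att_names]?).getD 0 = 1
    · have lhs : pvRowA "Wavy_Hair" att_names (List.idxOf "Wavy_Hair" att_names) att
          = (["Straight_Hair"] : List String).foldl (fun a n => pvSetA att_names a n) att := by
        simp [pvRowA, hv]
      rw [lhs, step, if_pos hv]
      exact pv_mapIdx_mem_congr _ _
        (by intro j; simp [pvTargetIdx, pvGroups, List.filter_cons]; try tauto) att
    · simp [pvRowA, hv]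
  by_cases h10 : att_name = "Mustache"
  · subst h10
    simp only [List.getD_eq_getElem?_getD]
    by_cases hv : (att[List.idxOf "Mustache" att_names]?).getD 0 = 1
    · have lhs : pvRowA "Mustache" att_names (List.idxOf "Mustache" att_names) att
          = (["No_Beard"] : List String).foldl (fun a n => pvSetA att_names a n) att := by
        simp [pvRowA, hv]
      rw [lhs, step, if_pos hv]
      exact pv_mapIdx_mem_congr _ _
        (by intro j; simp [pvTargetIdx, pvGroups, List.filter_cons]; try tauto) att
    · simp [pvRowA, hv]
  by_cases h11 : att_name = "No_Beard"
  · subst h11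
    simp only [List.getD_eq_getElem?_getD]
    by_cases hv : (att[List.idxOf "No_Beard" att_names]?).getD 0 = 1
    · have lhs : pvRowA "No_Beard" att_names (List.idxOf "No_Beard" att_names) att
          = (["Mustache"] : List String).foldl (fun a n => pvSetA att_names a n) att := by
        simp [pvRowA, hv]
      rw [lhs, step, if_pos hv]
      exact pv_mapIdx_mem_congr _ _
        (by intro j; simp [pvTargetIdx, pvGroups, List.filter_cons]; try tauto) att
    · simp [pvRowA, hv]
  · have ht : pvTargetIdx att_name att_names = [] := by
      simp [pvTargetIdx, pvGroups, h1, h2, h3, h4, h5, h6, h7, h8, h9, h10, h11]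
    simp [pvRowA, h1, h2, h3, h4, h5, h6, h7, h8, h9, h10, h11, ht, pv_mapIdx_noop]

-- ===== VERDICT =====
theorem check_attribute_conflict_spec : Claim_equal_check_attribute_conflict := by
  intro att_batch att_name att_names _ _
  unfold Spec_check_attribute_conflict check_attribute_conflict check_attribute_conflict_alt
  by_cases hz : (PySem.Set.ofList (pvTargetIdx att_name att_names) : PySem.Set Nat) = []
  · simp only [hz]
    have hmem : ∀ j : Nat, j ∉ pvTargetIdx att_name att_names := by
      intro j hj
      have := (PySem.Set.mem_ofList (pvTargetIdx att_name att_names) j).2 hj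
      simp [hz] at this
    have : ∀ att ∈ att_batch, pvRowA att_name att_names (att_names.idxOf att_name) att = att := by
      intro att _
      rw [pv_row_eq]
      split_ifs <;> simp [hmem, pv_mapIdx_noop]
    simp [List.map_congr_left this]
  · simp only [hz]
    apply List.map_congr_left
    intro att _
    rw [pv_row_eq]
    split_ifs with h <;> try rfl
    exact pv_mapIdx_mem_congr _ _ (fun j => (PySem.Set.mem_ofList _ j).symm) att
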